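-- pv_equiv track=rewrite | github.com/ngupta9/f1-tyre-deg | data_collection.py | get_car_tier
-- ===== SOURCE A (Python) =====
-- def get_car_tier(driver, year):
--     """
--     Assign car tier based on constructor championship standings
--     """
--     # Driver to team mapping for 2022-2023
--     driver_to_team = {
--         # 2022 teams
--         'VER': 'Red Bull', 'PER': 'Red Bull',
--         'LEC': 'Ferrari', 'SAI': 'Ferrari',
--         'HAM': 'Mercedes', 'RUS': 'Mercedes',
--         'ALO': 'Alpine', 'OCO': 'Alpine',
--         'NOR': 'McLaren', 'RIC': 'McLaren', 'PIA': 'McLaren',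
--         'BOT': 'Alfa Romeo', 'ZHO': 'Alfa Romeo',
--         'MAG': 'Haas', 'MSC': 'Haas', 'HUL': 'Haas',
--         'GAS': 'AlphaTauri', 'TSU': 'AlphaTauri', 'DEV': 'AlphaTauri', 'LAW': 'AlphaTauri',
--         'VET': 'Aston Martin', 'STR': 'Aston Martin', 'ALB': 'Williams', 'LAT': 'Williams',
--         # 2023 updates
--         'SAR': 'Williams'  # Sargeant
--     }
--
--     # Constructor championship standings by year
--     team_tiers = {
--         2022: {
--             'Tier 1': ['Red Bull', 'Ferrari', 'Mercedes'],
--             'Tier 2': ['Alpine', 'McLaren', 'Alfa Romeo', 'Haas'],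
--             'Tier 3': ['AlphaTauri', 'Aston Martin', 'Williams']
--         },
--         2023: {
--             'Tier 1': ['Red Bull', 'Mercedes', 'Ferrari'],
--             'Tier 2': ['Aston Martin', 'McLaren', 'Alpine', 'AlphaTauri'],
--             'Tier 3': ['Williams', 'Alfa Romeo', 'Haas']
--         }
--     }
--
--     # Get team for driver
--     team = driver_to_team.get(driver, 'Unknown')
--
--     # Get tier for team and year
--     year_tiers = team_tiers.get(year, team_tiers[2022])  # Default to 2022 if year not found
--
--     for tier_name, teams in year_tiers.items():
--         if team in teams:
--             if tier_name == 'Tier 1':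
--                 return 0
--             elif tier_name == 'Tier 2':
--                 return 1
--             else:  # Tier 3
--                 return 2
--
--     # Default to Tier 2 (midfield) if unknown
--     return 1
-- ===== SOURCE B (Python) =====
-- _DRIVER_TO_TEAM = {
--     'VER': 'Red Bull', 'PER': 'Red Bull',
--     'LEC': 'Ferrari', 'SAI': 'Ferrari',
--     'HAM': 'Mercedes', 'RUS': 'Mercedes',
--     'ALO': 'Alpine', 'OCO': 'Alpine',
--     'NOR': 'McLaren', 'RIC': 'McLaren', 'PIA': 'McLaren',
--     'BOT': 'Alfa Romeo', 'ZHO': 'Alfa Romeo',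
--     'MAG': 'Haas', 'MSC': 'Haas', 'HUL': 'Haas',
--     'GAS': 'AlphaTauri', 'TSU': 'AlphaTauri', 'DEV': 'AlphaTauri', 'LAW': 'AlphaTauri',
--     'VET': 'Aston Martin', 'STR': 'Aston Martin', 'ALB': 'Williams', 'LAT': 'Williams',
--     'SAR': 'Williams',
-- }
--
-- # Flat per-year mapping team -> tier int (Tier 1 -> 0, Tier 2 -> 1, Tier 3 -> 2)
-- _TIER_BY_YEAR = {
--     2022: {
--         'Red Bull': 0, 'Ferrari': 0, 'Mercedes': 0,
--         'Alpine': 1, 'McLaren': 1, 'Alfa Romeo': 1, 'Haas': 1,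
--         'AlphaTauri': 2, 'Aston Martin': 2, 'Williams': 2,
--     },
--     2023: {
--         'Red Bull': 0, 'Mercedes': 0, 'Ferrari': 0,
--         'Aston Martin': 1, 'McLaren': 1, 'Alpine': 1, 'AlphaTauri': 1,
--         'Williams': 2, 'Alfa Romeo': 2, 'Haas': 2,
--     },
-- }
--
--
-- def get_car_tier(driver, year):
--     """Assign car tier based on constructor championship standings."""
--     team = _DRIVER_TO_TEAM.get(driver, 'Unknown')
--     return _TIER_BY_YEAR.get(year, _TIER_BY_YEAR[2022]).get(team, 1)
-- ===== Notes on version B (the rewrite author's own statement) =====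
-- stated objective: simpler
-- what changed: Replaces the loop over tier-name->team-list entries and the tier-name if/elif chain with a precomputed flat year->{team: tier_int} table, so the body is two direct dict lookups with defaults.
import Mathlib
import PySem

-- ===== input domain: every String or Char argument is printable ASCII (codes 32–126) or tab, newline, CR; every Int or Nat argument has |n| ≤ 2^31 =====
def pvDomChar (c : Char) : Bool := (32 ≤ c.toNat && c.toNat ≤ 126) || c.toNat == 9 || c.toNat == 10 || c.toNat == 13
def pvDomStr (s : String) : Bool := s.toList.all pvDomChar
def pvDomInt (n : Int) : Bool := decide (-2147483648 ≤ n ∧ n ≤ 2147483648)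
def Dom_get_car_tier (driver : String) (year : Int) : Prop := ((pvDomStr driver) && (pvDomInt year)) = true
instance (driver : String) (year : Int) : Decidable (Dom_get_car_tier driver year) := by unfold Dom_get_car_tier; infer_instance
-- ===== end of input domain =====

-- B replaces A's scan over tier-name -> team-list entries with a flat per-year team -> tier-int table: simpler direct lookups.


-- ===== PORT A =====
-- the driver -> team literal dict, shared by both Pythons verbatim
def pvDriverPairs : List (String × String) :=
  [("VER", "Red Bull"), ("PER", "Red Bull"),
   ("LEC", "Ferrari"), ("SAI", "Ferrari"),
   ("HAM", "Mercedes"), ("RUS", "Mercedes"),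
   ("ALO", "Alpine"), ("OCO", "Alpine"),
   ("NOR", "McLaren"), ("RIC", "McLaren"), ("PIA", "McLaren"),
   ("BOT", "Alfa Romeo"), ("ZHO", "Alfa Romeo"),
   ("MAG", "Haas"), ("MSC", "Haas"), ("HUL", "Haas"),
   ("GAS", "AlphaTauri"), ("TSU", "AlphaTauri"), ("DEV", "AlphaTauri"), ("LAW", "AlphaTauri"),
   ("VET", "Aston Martin"), ("STR", "Aston Martin"), ("ALB", "Williams"), ("LAT", "Williams"),
   ("SAR", "Williams")]

-- A's 'for tier_name, teams in year_tiers.items(): if team in teams: return …' loop; falls through to 1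
def tierLoopA : List (String × List String) → String → Int
  | [], _ => 1
  | (tier_name, teams) :: rest, team =>
    if team ∈ teams then
      if tier_name = "Tier 1" then 0
      else if tier_name = "Tier 2" then 1
      else 2
    else tierLoopA rest team

def pvTiers2022A : PySem.Dict String (List String) :=
  PySem.Dict.ofList
    [("Tier 1", ["Red Bull", "Ferrari", "Mercedes"]),
     ("Tier 2", ["Alpine", "McLaren", "Alfa Romeo", "Haas"]),
     ("Tier 3", ["AlphaTauri", "Aston Martin", "Williams"])]

def pvTiers2023A : PySem.Dict String (List String) :=
  PySem.Dict.ofList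
    [("Tier 1", ["Red Bull", "Mercedes", "Ferrari"]),
     ("Tier 2", ["Aston Martin", "McLaren", "Alpine", "AlphaTauri"]),
     ("Tier 3", ["Williams", "Alfa Romeo", "Haas"])]

def get_car_tier (driver : String) (year : Int) : Int :=
  let driver_to_team : PySem.Dict String String := PySem.Dict.ofList pvDriverPairs
  let team_tiers : PySem.Dict Int (PySem.Dict String (List String)) :=
    PySem.Dict.ofList [(2022, pvTiers2022A), (2023, pvTiers2023A)]
  let team := driver_to_team.getD driver "Unknown"
  let year_tiers := team_tiers.getD year pvTiers2022A  -- .get(year, team_tiers[2022])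
  tierLoopA year_tiers.items team

-- ===== PORT B =====
def pvFlat2022 : PySem.Dict String Int :=
  PySem.Dict.ofList
    [("Red Bull", 0), ("Ferrari", 0), ("Mercedes", 0),
     ("Alpine", 1), ("McLaren", 1), ("Alfa Romeo", 1), ("Haas", 1),
     ("AlphaTauri", 2), ("Aston Martin", 2), ("Williams", 2)]

def pvFlat2023 : PySem.Dict String Int :=
  PySem.Dict.ofList
    [("Red Bull", 0), ("Mercedes", 0), ("Ferrari", 0),
     ("Aston Martin", 1), ("McLaren", 1), ("Alpine", 1), ("AlphaTauri", 1),
     ("Williams", 2), ("Alfa Romeo", 2), ("Haas", 2)]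

def get_car_tier_alt (driver : String) (year : Int) : Int :=
  let team := (PySem.Dict.ofList pvDriverPairs).getD driver "Unknown"
  let tier_by_year : PySem.Dict Int (PySem.Dict String Int) :=
    PySem.Dict.ofList [(2022, pvFlat2022), (2023, pvFlat2023)]
  (tier_by_year.getD year pvFlat2022).getD team 1

-- ===== PRECONDITION & SPEC =====
def Spec_get_car_tier (driver : String) (year : Int) (out : Int) : Prop := out = get_car_tier_alt driver year
instance (driver : String) (year : Int) (out : Int) : Decidable (Spec_get_car_tier driver year out) := by unfold Spec_get_car_tier; infer_instance

-- ===== CLAIM (what is proved, stated in full; the proofs are below) =====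
def Claim_equal_get_car_tier : Prop := ∀ (driver : String) (year : Int), Dom_get_car_tier driver year → Spec_get_car_tier driver year (get_car_tier driver year)

-- ===== LEMMAS AND PROOFS =====

-- every team value the driver lookup can produce (the dict's values plus the default)
def pvTeams : List String :=
  ["Red Bull", "Ferrari", "Mercedes", "Alpine", "McLaren", "Alfa Romeo", "Haas",
   "AlphaTauri", "Aston Martin", "Williams", "Unknown"]

theorem team_mem (driver : String) :
    (PySem.Dict.ofList pvDriverPairs).getD driver "Unknown" ∈ pvTeams := by
  rw [PySem.Dict.getD_eq_get?_getD]
  cases h : (PySem.Dict.ofList pvDriverPairs).get? driver with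
  | none => simp [pvTeams]
  | some v =>
    have hmem := PySem.Dict.mem_items_of_get?_eq_some _ h
    have hv : v ∈ (PySem.Dict.ofList pvDriverPairs).items.map (·.2) :=
      List.mem_map.mpr ⟨_, hmem, rfl⟩
    have hall : ((PySem.Dict.ofList pvDriverPairs).items.map (·.2)).all (· ∈ pvTeams) = true := by decide
    simpa using List.all_eq_true.mp hall _ hv

-- .get(year, default) on a two-entry Int-keyed literal dict, year hitting neither key
theorem getD_two_default {ν : Type} (x y : ν) (year : Int) (h22 : year ≠ 2022) (h23 : year ≠ 2023) :
    (PySem.Dict.ofList [(2022, x), (2023, y)]).getD year x = x := by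
  simp [PySem.Dict.ofList, PySem.Dict.update, PySem.Dict.getD_insert, PySem.Dict.getD_empty, h22, h23]

theorem agree_team (team : String) (hteam : team ∈ pvTeams) (year : Int) :
    tierLoopA ((PySem.Dict.ofList
        [((2022 : Int), pvTiers2022A), (2023, pvTiers2023A)]).getD year pvTiers2022A).items team
      = ((PySem.Dict.ofList
        [((2022 : Int), pvFlat2022), (2023, pvFlat2023)]).getD year pvFlat2022).getD team 1 := by
  fin_cases hteam <;>
  · rcases eq_or_ne year 2022 with rfl | h22
    · decide
    rcases eq_or_ne year 2023 with rfl | h23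
    · decide
    rw [getD_two_default _ _ _ h22 h23, getD_two_default _ _ _ h22 h23]
    decide

-- ===== VERDICT (by name: the statement is the Claim_ definition above) =====
theorem get_car_tier_spec : Claim_equal_get_car_tier := by
  intro driver year _
  unfold Spec_get_car_tier get_car_tier get_car_tier_alt
  exact agree_team _ (team_mem driver) year
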